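-- pv_equiv track=rewrite | github.com/yohan278/KITE-Kernel-Intelligence | external/ipw_internal/intelligence-per-watt/grid_eval/analyze.py | _get_group_boundaries
-- ===== SOURCE A (Python) =====
-- from typing import Any, Dict, List, Mapping, Optional, Sequence
--
-- def _get_group_boundaries(
--     metrics: Sequence[str],
--     groups: Sequence[Sequence[str]],
-- ) -> List[int]:
--     """Return indices after which to insert a separator row.
--
--     Based on metric group definitions — insert a separator
--     after the last metric in each group (except the final group).
--     """
--     boundaries: List[int] = []
--     idx = 0
--     for group in groups[:-1]:  # No separator after the last group
--         for m in group:
--             if m in metrics: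
--                 idx += 1
--         boundaries.append(idx)
--     return boundaries
-- ===== SOURCE B (Python) =====
-- from typing import List, Sequence
--
--
-- def _boundaries_rec(metrics: Sequence[str], gs: List[Sequence[str]]) -> List[int]:
--     """Recursive: head group's count, then the tail's boundaries shifted by it."""
--     if not gs:
--         return []
--     c = sum(1 for m in gs[0] if m in metrics)
--     return [c] + [c + b for b in _boundaries_rec(metrics, gs[1:])]
--
--
-- def _get_group_boundaries(
--     metrics: Sequence[str],
--     groups: Sequence[Sequence[str]],
-- ) -> List[int]:
--     return _boundaries_rec(metrics, list(groups[:-1]))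
-- ===== Notes on version B (the rewrite author's own statement) =====
-- stated objective: alternative
-- what changed: Replaces A's iterative loop carrying a running counter by a structural recursion on the group list: compute the head group's match count, recurse on the tail, and shift every recursive boundary by the head count, so no accumulator or cumulative state is threaded at all.
import Mathlib
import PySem

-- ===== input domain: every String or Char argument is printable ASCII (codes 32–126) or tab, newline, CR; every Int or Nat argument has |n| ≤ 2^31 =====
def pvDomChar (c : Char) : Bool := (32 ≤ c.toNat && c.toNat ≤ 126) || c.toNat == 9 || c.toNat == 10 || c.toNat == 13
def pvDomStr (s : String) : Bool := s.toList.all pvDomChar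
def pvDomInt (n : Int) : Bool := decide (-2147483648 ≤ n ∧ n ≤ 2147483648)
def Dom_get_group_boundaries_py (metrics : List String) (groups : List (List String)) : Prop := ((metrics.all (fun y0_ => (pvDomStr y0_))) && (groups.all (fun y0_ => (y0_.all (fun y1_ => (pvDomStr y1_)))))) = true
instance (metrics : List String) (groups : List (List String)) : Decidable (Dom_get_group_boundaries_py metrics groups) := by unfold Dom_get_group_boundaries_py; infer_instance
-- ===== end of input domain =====

-- B replaces A's running-counter loop by a structural recursion that shifts the tail's boundaries by the head group's count (alternative decomposition).


-- ===== PORT A =====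
-- Port of A: one loop over groups[:-1] carrying (idx, boundaries); inner loop bumps idx per match.
def get_group_boundaries_py (metrics : List String) (groups : List (List String)) : List Int :=
  (groups.dropLast.foldl
    (fun (st : Int × List Int) group =>
      let idx := group.foldl (fun i m => if m ∈ metrics then i + 1 else i) st.1
      (idx, st.2 ++ [idx]))
    (0, [])).2

-- ===== PORT B =====
-- B helper: recursion on the group list; head count, then tail boundaries shifted by it.
def pvBoundariesRec (metrics : List String) : List (List String) → List Int
  | [] => []
  | g :: gs =>
    let c : Int := ((g.filter (fun m => m ∈ metrics)).length : Int)
    c :: (pvBoundariesRec metrics gs).map (fun b => c + b)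

-- Port of B.
def get_group_boundaries_py_alt (metrics : List String) (groups : List (List String)) : List Int :=
  pvBoundariesRec metrics groups.dropLast

-- ===== PRECONDITION & SPEC =====
def Spec_get_group_boundaries_py (metrics : List String) (groups : List (List String)) (out : List Int) : Prop := out = get_group_boundaries_py_alt metrics groups
instance (metrics : List String) (groups : List (List String)) (out : List Int) : Decidable (Spec_get_group_boundaries_py metrics groups out) := by unfold Spec_get_group_boundaries_py; infer_instance

-- ===== CLAIM (what is proved, stated in full; the proofs are below) =====
def Claim_equal_get_group_boundaries_py : Prop := ∀ (metrics : List String) (groups : List (List String)), Dom_get_group_boundaries_py metrics groups → Spec_get_group_boundaries_py metrics groups (get_group_boundaries_py metrics groups)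

-- ===== LEMMAS AND PROOFS =====
lemma inner_count (metrics : List String) (g : List String) (i : Int) :
    g.foldl (fun i m => if m ∈ metrics then i + 1 else i) i
      = i + ((g.filter (fun m => m ∈ metrics)).length : Int) := by
  induction g generalizing i with
  | nil => simp
  | cons m gs ih =>
    simp only [List.foldl_cons, List.filter_cons]
    by_cases h : m ∈ metrics <;> simp [h, ih]; ring

lemma foldA_eq (metrics : List String) (gs : List (List String)) (s : Int) (acc : List Int) :
    (gs.foldl
      (fun (st : Int × List Int) group =>
        let idx := group.foldl (fun i m => if m ∈ metrics then i + 1 else i) st.1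
        (idx, st.2 ++ [idx]))
      (s, acc)).2
      = acc ++ (pvBoundariesRec metrics gs).map (fun b => s + b) := by
  induction gs generalizing s acc with
  | nil => simp [pvBoundariesRec]
  | cons g gs ih =>
    simp only [List.foldl_cons]
    rw [ih]
    simp [pvBoundariesRec, inner_count, List.map_map, add_assoc]

-- ===== VERDICT (by name: the statement is the Claim_ definition above) =====
theorem get_group_boundaries_py_spec : Claim_equal_get_group_boundaries_py := by
  intro metrics groups _
  unfold Spec_get_group_boundaries_py get_group_boundaries_py get_group_boundaries_py_alt
  simpa using foldA_eq metrics groups.dropLast 0 []
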